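-- pv_equiv track=rewrite | github.com/XingmingQu/SMU-Mobile-Apps-Sensing-learning | Lab5Server/sklearnhandlers.py | formatDictResult
-- ===== SOURCE A (Python) =====
-- def formatDictResult(checkList):
--     result = ""
--     for k,v in checkList.items():
--         if k =="UNKNOWN":
--             continue
--
--         if v == False:
--             s = "{:18s} {:6s}\n".format(k, '❌')
--             result = result+s
--         else:
--             s = "{:18s} {:6s}\n".format(k, '✅')
--             result = s+result
--
--     return result
-- ===== SOURCE B (Python) =====
-- def formatDictResult(checkList):
--     items = list(checkList.items())
--     wins = "".join("{:18s} {:6s}\n".format(k, '\u2705')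
--                    for k, v in reversed(items) if k != "UNKNOWN" and v != False)
--     losses = "".join("{:18s} {:6s}\n".format(k, '\u274c')
--                      for k, v in items if k != "UNKNOWN" and v == False)
--     return wins + losses
-- ===== Notes on version B (the rewrite author's own statement) =====
-- stated objective: faster
-- what changed: Instead of one loop mutating a single string by prepend (success) or append (failure), B makes two staged filtered passes: successes collected over the reversed item list and failures over the forward list, each joined once, then concatenated.
import Mathlib
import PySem

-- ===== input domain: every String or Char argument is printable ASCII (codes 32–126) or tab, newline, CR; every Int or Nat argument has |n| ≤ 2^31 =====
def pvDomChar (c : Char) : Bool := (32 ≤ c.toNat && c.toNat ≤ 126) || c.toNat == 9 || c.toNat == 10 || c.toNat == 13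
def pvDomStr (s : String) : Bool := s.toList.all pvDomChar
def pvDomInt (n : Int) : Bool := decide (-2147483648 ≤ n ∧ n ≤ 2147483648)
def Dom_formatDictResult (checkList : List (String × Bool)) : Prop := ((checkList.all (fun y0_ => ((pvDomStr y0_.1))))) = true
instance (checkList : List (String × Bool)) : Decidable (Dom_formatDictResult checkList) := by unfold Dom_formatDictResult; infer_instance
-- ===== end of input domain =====

-- B replaces A's single loop with its prepend/append string accumulator by two staged filtered passes (successes over the reversed items, failures forward), each joined once (objective: faster — avoids repeated string concatenation).

-- "{:18s} {:6s}\n".format(k, mark): k space-padded to ≥18, one space, the 1-char mark padded to 6.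
def fdrLine (k : List Char) (mark : Char) : List Char :=
  k ++ List.replicate (18 - k.length) ' ' ++ [' ', mark] ++ List.replicate 5 ' ' ++ ['\n']

-- ===== PORT A =====
def formatDictResult (checkList : List (String × Bool)) : String :=
  String.mk (checkList.foldl
    (fun result kv =>
      if kv.1 = "UNKNOWN" then result
      else if kv.2 = false then result ++ fdrLine kv.1.toList '❌'
      else fdrLine kv.1.toList '✅' ++ result)
    [])

-- ===== PORT B =====
def formatDictResult_alt (checkList : List (String × Bool)) : String :=
  let wins :=
    ((checkList.reverse.filter (fun kv => !(kv.1 = "UNKNOWN") && kv.2)).map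
      (fun kv => fdrLine kv.1.toList '✅')).flatten
  let losses :=
    ((checkList.filter (fun kv => !(kv.1 = "UNKNOWN") && !kv.2)).map
      (fun kv => fdrLine kv.1.toList '❌')).flatten
  String.mk (wins ++ losses)

-- ===== PRECONDITION & SPEC =====
def Spec_formatDictResult (checkList : List (String × Bool)) (out : String) : Prop := out = formatDictResult_alt checkList
instance (checkList : List (String × Bool)) (out : String) : Decidable (Spec_formatDictResult checkList out) := by unfold Spec_formatDictResult; infer_instance

-- ===== CLAIM (what is proved, stated in full; the proofs are below) =====
def Claim_equal_formatDictResult : Prop := ∀ (checkList : List (String × Bool)), Dom_formatDictResult checkList → Spec_formatDictResult checkList (formatDictResult checkList)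

-- ===== LEMMAS AND PROOFS =====

def fdrWins (l : List (String × Bool)) : List (List Char) :=
  (l.filter (fun kv => !(kv.1 = "UNKNOWN") && kv.2)).map (fun kv => fdrLine kv.1.toList '✅')

def fdrLosses (l : List (String × Bool)) : List (List Char) :=
  (l.filter (fun kv => !(kv.1 = "UNKNOWN") && !kv.2)).map (fun kv => fdrLine kv.1.toList '❌')

theorem fdr_foldA (l : List (String × Bool)) : ∀ (acc : List Char),
    l.foldl
      (fun result kv =>
        if kv.1 = "UNKNOWN" then result
        else if kv.2 = false then result ++ fdrLine kv.1.toList '❌'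
        else fdrLine kv.1.toList '✅' ++ result)
      acc
    = (fdrWins l).reverse.flatten ++ acc ++ (fdrLosses l).flatten := by
  induction l with
  | nil => intro acc; simp [fdrWins, fdrLosses]
  | cons kv t ih =>
    intro acc
    by_cases hu : kv.1 = "UNKNOWN"
    · simp [List.foldl, hu, ih, fdrWins, fdrLosses, List.filter]
    · cases hv : kv.2 <;>
        simp [List.foldl, hu, hv, ih, fdrWins, fdrLosses, List.filter]

-- ===== VERDICT (by name: the statement is the Claim_ definition above) =====
theorem formatDictResult_spec : Claim_equal_formatDictResult := by
  intro checkList _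
  unfold Spec_formatDictResult formatDictResult formatDictResult_alt
  rw [fdr_foldA]
  simp [fdrWins, fdrLosses, List.filter_reverse]
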